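-- pv_equiv track=rewrite | github.com/YixuanSeanZhou/GaryPlanner | back_end/src/apis/four_year_plan.py | generate_quarter_names
-- ===== SOURCE A (Python) =====
-- def generate_quarter_names(start_year):
--
--     year = [0] * 5
--
--     for i in range(0, 5):
--         year[i] = start_year + i
--
--     quarter_names = []
--     quarter_names.append("FA" + str(year[0])[2:4])
--
--     for i in range(1, 4):
--         quarter_names.append("WI" + str(year[i])[2:4])
--         quarter_names.append("SP" + str(year[i])[2:4])
--         quarter_names.append("FA" + str(year[i])[2:4])
--
--     quarter_names.append("WI" + str(year[4])[2:4])
--     quarter_names.append("SP" + str(year[4])[2:4])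
--
--     return quarter_names
-- ===== SOURCE B (Python) =====
-- def generate_quarter_names(start_year):
--     # Quarter k (0..11) has season ("FA","WI","SP")[k % 3] and academic year
--     # offset (k + 2) // 3: a closed-form index computation instead of staged appends.
--     return [("FA", "WI", "SP")[k % 3] + str(start_year + (k + 2) // 3)[2:4]
--             for k in range(12)]
-- ===== Notes on version B (the rewrite author's own statement) =====
-- stated objective: simpler
-- what changed: Replaces A's precomputed year array, special-cased leading FA, WI/SP/FA middle loop and trailing WI/SP with a single comprehension over the quarter index that computes each quarter's season and year offset by closed-form modular arithmetic.
import Mathlib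
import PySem

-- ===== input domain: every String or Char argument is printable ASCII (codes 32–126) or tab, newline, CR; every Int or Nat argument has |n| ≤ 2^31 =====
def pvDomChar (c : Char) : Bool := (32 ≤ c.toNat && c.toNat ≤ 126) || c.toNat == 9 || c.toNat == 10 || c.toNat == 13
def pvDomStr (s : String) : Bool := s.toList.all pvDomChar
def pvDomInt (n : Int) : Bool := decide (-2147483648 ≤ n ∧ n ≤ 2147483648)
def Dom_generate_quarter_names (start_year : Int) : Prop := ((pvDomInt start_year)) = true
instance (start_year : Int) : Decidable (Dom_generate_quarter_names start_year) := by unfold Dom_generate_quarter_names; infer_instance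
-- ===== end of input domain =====

-- B replaces A's year array, special-cased leading FA, middle loop and trailing WI/SP
-- with one comprehension computing quarter k's season (k % 3) and year offset ((k+2)//3)
-- in closed form (simpler).

-- ===== PORT A =====
-- str(y)[2:4]
def pvQTag (y : Int) : String := String.mk (PySem.List.slice (PySem.Int.toStr y).toList (some 2) (some 4))

def generate_quarter_names (start_year : Int) : List String :=
  -- year = [0]*5; for i in range(0,5): year[i] = start_year + i
  -- (year[i] assignment: i is 0..4 on a length-5 list, always in range; List.set is exact here)
  let year : List Int :=
    (PySem.List.pyRange 0 5 1).foldl (fun ys i => ys.set i.toNat (start_year + i)) [0, 0, 0, 0, 0]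
  -- year[i] reads: index always in range on the length-5 list, pyGetD with default 0 is exact
  let quarter_names : List String := []
  let quarter_names := quarter_names ++ ["FA" ++ pvQTag (PySem.List.pyGetD year 0 0)]
  let quarter_names :=
    (PySem.List.pyRange 1 4 1).foldl
      (fun qs i =>
        qs ++ ["WI" ++ pvQTag (PySem.List.pyGetD year i 0)]
           ++ ["SP" ++ pvQTag (PySem.List.pyGetD year i 0)]
           ++ ["FA" ++ pvQTag (PySem.List.pyGetD year i 0)])
      quarter_names
  let quarter_names := quarter_names ++ ["WI" ++ pvQTag (PySem.List.pyGetD year 4 0)]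
  let quarter_names := quarter_names ++ ["SP" ++ pvQTag (PySem.List.pyGetD year 4 0)]
  quarter_names

-- ===== PORT B =====
def generate_quarter_names_alt (start_year : Int) : List String :=
  (PySem.List.pyRange 0 12 1).map (fun k =>
    -- ("FA","WI","SP")[k % 3]: k is 0..11, so k % 3 is 0..2; a match is exact
    (match PySem.Int.mod k 3 with | 0 => "FA" | 1 => "WI" | _ => "SP")
      ++ pvQTag (start_year + PySem.Int.floordiv (k + 2) 3))

-- ===== PRECONDITION & SPEC =====
def Spec_generate_quarter_names (start_year : Int) (out : List String) : Prop := out = generate_quarter_names_alt start_year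
instance (start_year : Int) (out : List String) : Decidable (Spec_generate_quarter_names start_year out) := by unfold Spec_generate_quarter_names; infer_instance

-- ===== CLAIM (what is proved, stated in full; the proofs are below) =====
def Claim_equal_generate_quarter_names : Prop := ∀ (start_year : Int), Dom_generate_quarter_names start_year → Spec_generate_quarter_names start_year (generate_quarter_names start_year)

-- ===== LEMMAS AND PROOFS =====

-- ===== VERDICT (by name: the statement is the Claim_ definition above) =====
theorem generate_quarter_names_spec : Claim_equal_generate_quarter_names := by
  intro n _
  unfold Spec_generate_quarter_names generate_quarter_names generate_quarter_names_alt
  simp [PySem.List.pyRange, List.range_succ, PySem.List.pyGetD, PySem.List.pyIdx?, PySem.List.pyGet?,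
        PySem.Int.mod, PySem.Int.floordiv]
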